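-- pv_equiv track=rewrite | github.com/chandan29feb/Old-Tech-page | diagnose_website.py | format_tech_name
-- ===== SOURCE A (Python) =====
-- def format_tech_name(vulnerabilities, detected_techs=None):
--     """Format technology name from vulnerabilities list or detected technologies."""
--     # Map tech types to readable names
--     tech_map = {
--         "angularjs": "AngularJS",
--         "angular": "Angular",
--         "jquery": "jQuery",
--         "bootstrap": "Bootstrap",
--         "react": "React",
--         "vue": "Vue.js",
--         "nextjs": "Next.js",
--         "nuxt": "Nuxt.js",
--         "svelte": "Svelte",
--         "backbone": "Backbone.js",
--         "ember": "Ember.js",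
--         "knockout": "Knockout.js",
--         "dojo": "Dojo Toolkit",
--         "prototype": "Prototype.js",
--         "mootools": "MooTools",
--         "yui": "YUI",
--         "extjs": "ExtJS",
--         "underscore": "Underscore.js",
--         "lodash": "Lodash",
--         "moment": "Moment.js",
--         "jquery_ui": "jQuery UI",
--         "wordpress": "WordPress",
--         "drupal": "Drupal",
--         "joomla": "Joomla",
--         "magento": "Magento",
--         "shopify": "Shopify",
--         "woocommerce": "WooCommerce",
--         "aspnet": "ASP.NET",
--         "php": "PHP",
--         "rails": "Ruby on Rails",
--         "django": "Django",
--         "laravel": "Laravel",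
--         "handlebars": "Handlebars",
--         "mustache": "Mustache.js",
--         "marionette": "Marionette.js",
--         "requirejs": "RequireJS",
--         "socketio": "Socket.io",
--         "express": "Express.js",
--         "fontawesome": "Font Awesome",
--         "modernizr": "Modernizr",
--     }
--
--     # First, try to get tech from vulnerabilities
--     if vulnerabilities:
--         first_vuln = vulnerabilities[0]
--         tech_type = first_vuln.get("type", "")
--         version = first_vuln.get("version", "unknown")
--
--         tech_name = "Unknown"
--         for key, name in tech_map.items():
--             if key in tech_type.lower():
--                 tech_name = name
--                 break
--
--         if version != "unknown":
--             tech_name = f"{tech_name} {version}"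
--
--         return tech_name
--
--     # If no vulnerabilities, use detected technologies
--     if detected_techs:
--         # Prioritize frameworks over libraries
--         priority_order = ["react", "vue", "angular", "angularjs", "nextjs", "nuxt", "svelte",
--                         "wordpress", "drupal", "joomla", "magento", "shopify", "rails",
--                         "django", "laravel", "aspnet", "php", "express"]
--
--         for priority_tech in priority_order:
--             for tech in detected_techs:
--                 if tech["name"] == priority_tech:
--                     tech_name = tech_map.get(priority_tech, priority_tech.title())
--                     if tech["version"]:
--                         tech_name = f"{tech_name} {tech['version']}"
--                     return tech_name
--
--         # If no priority tech found, use first detected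
--         first_tech = detected_techs[0]
--         tech_name = tech_map.get(first_tech["name"], first_tech["name"].title())
--         if first_tech["version"]:
--             tech_name = f"{tech_name} {first_tech['version']}"
--         return tech_name
--
--     return "Unknown"
-- ===== SOURCE B (Python) =====
-- TECH_MAP = {
--     "angularjs": "AngularJS", "angular": "Angular", "jquery": "jQuery",
--     "bootstrap": "Bootstrap", "react": "React", "vue": "Vue.js",
--     "nextjs": "Next.js", "nuxt": "Nuxt.js", "svelte": "Svelte",
--     "backbone": "Backbone.js", "ember": "Ember.js", "knockout": "Knockout.js",
--     "dojo": "Dojo Toolkit", "prototype": "Prototype.js", "mootools": "MooTools",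
--     "yui": "YUI", "extjs": "ExtJS", "underscore": "Underscore.js",
--     "lodash": "Lodash", "moment": "Moment.js", "jquery_ui": "jQuery UI",
--     "wordpress": "WordPress", "drupal": "Drupal", "joomla": "Joomla",
--     "magento": "Magento", "shopify": "Shopify", "woocommerce": "WooCommerce",
--     "aspnet": "ASP.NET", "php": "PHP", "rails": "Ruby on Rails",
--     "django": "Django", "laravel": "Laravel", "handlebars": "Handlebars",
--     "mustache": "Mustache.js", "marionette": "Marionette.js",
--     "requirejs": "RequireJS", "socketio": "Socket.io", "express": "Express.js",
--     "fontawesome": "Font Awesome", "modernizr": "Modernizr",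
-- }
--
-- PRIORITY_ORDER = ["react", "vue", "angular", "angularjs", "nextjs", "nuxt", "svelte",
--                   "wordpress", "drupal", "joomla", "magento", "shopify", "rails",
--                   "django", "laravel", "aspnet", "php", "express"]
--
--
-- def _render(name, version):
--     tech_name = TECH_MAP.get(name, name.title())
--     return f"{tech_name} {version}" if version else tech_name
--
--
-- def format_tech_name(vulnerabilities, detected_techs=None):
--     if vulnerabilities:
--         first_vuln = vulnerabilities[0]
--         lowered = first_vuln.get("type", "").lower()
--         tech_name = next((name for key, name in TECH_MAP.items() if key in lowered),
--                          "Unknown")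
--         version = first_vuln.get("version", "unknown")
--         return tech_name if version == "unknown" else f"{tech_name} {version}"
--     if not detected_techs:
--         return "Unknown"
--     # single pass: argmin of priority rank, first occurrence wins on ties
--     rank = {name: i for i, name in enumerate(PRIORITY_ORDER)}
--     absent = len(PRIORITY_ORDER)
--     best = detected_techs[0]
--     best_rank = rank.get(best["name"], absent)
--     for tech in detected_techs[1:]:
--         r = rank.get(tech["name"], absent)
--         if r < best_rank:
--             best, best_rank = tech, r
--     return _render(best["name"], best["version"])
-- ===== Notes on version B (the rewrite author's own statement) =====
-- stated objective: alternative
-- what changed: The detected-techs branch's nested priority-by-priority rescans of the tech list are replaced by building a rank dictionary once and taking a single argmin pass (first occurrence wins ties), with the absent rank doubling as the first-tech fallback.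
-- outside the precondition, e.g. on format_tech_name([], [{'name': 'react', 'version': ''}, {}]): A returns 'React', B raises KeyError
import Mathlib
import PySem

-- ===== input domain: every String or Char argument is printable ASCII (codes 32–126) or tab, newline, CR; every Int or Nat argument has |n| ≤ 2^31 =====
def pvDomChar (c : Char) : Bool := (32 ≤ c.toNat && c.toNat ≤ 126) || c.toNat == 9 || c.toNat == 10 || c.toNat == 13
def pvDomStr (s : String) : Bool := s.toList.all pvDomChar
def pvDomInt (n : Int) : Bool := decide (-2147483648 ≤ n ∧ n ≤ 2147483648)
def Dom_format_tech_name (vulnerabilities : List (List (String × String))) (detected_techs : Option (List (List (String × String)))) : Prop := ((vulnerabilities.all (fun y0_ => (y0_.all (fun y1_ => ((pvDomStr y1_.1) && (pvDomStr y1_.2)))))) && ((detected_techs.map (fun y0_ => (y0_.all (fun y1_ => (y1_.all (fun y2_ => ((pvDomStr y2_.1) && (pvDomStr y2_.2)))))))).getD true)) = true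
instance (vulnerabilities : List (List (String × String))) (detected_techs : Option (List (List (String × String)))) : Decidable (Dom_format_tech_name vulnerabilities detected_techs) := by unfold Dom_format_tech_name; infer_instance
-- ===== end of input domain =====

-- B replaces A's nested priority×techs scan by one argmin pass over a rank dictionary (alternative decomposition, same result).

-- shared primitive ports (dict literals as assoc lists; d.get(k, dflt) = first match)
def pyDictGet (d : List (String × String)) (k dflt : String) : String :=
  match d.find? (fun p => p.1 == k) with
  | some p => p.2
  | none => dflt

-- hand port of str.title(): exact on ASCII (the Dom domain); prev = "previous char was alphabetic"
def pyTitleChars : List Char → Bool → List Char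
  | [], _ => []
  | c :: cs, prev =>
    (if PySem.Chars.isalpha c then
       (if prev then PySem.Chars.lowerChar c else PySem.Chars.upperChar c)
     else c) :: pyTitleChars cs (PySem.Chars.isalpha c)

def pyTitle (s : String) : String := String.ofList (pyTitleChars s.toList false)

def techMapList : List (String × String) :=
  [("angularjs", "AngularJS"), ("angular", "Angular"), ("jquery", "jQuery"),
   ("bootstrap", "Bootstrap"), ("react", "React"), ("vue", "Vue.js"),
   ("nextjs", "Next.js"), ("nuxt", "Nuxt.js"), ("svelte", "Svelte"),
   ("backbone", "Backbone.js"), ("ember", "Ember.js"), ("knockout", "Knockout.js"),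
   ("dojo", "Dojo Toolkit"), ("prototype", "Prototype.js"), ("mootools", "MooTools"),
   ("yui", "YUI"), ("extjs", "ExtJS"), ("underscore", "Underscore.js"),
   ("lodash", "Lodash"), ("moment", "Moment.js"), ("jquery_ui", "jQuery UI"),
   ("wordpress", "WordPress"), ("drupal", "Drupal"), ("joomla", "Joomla"),
   ("magento", "Magento"), ("shopify", "Shopify"), ("woocommerce", "WooCommerce"),
   ("aspnet", "ASP.NET"), ("php", "PHP"), ("rails", "Ruby on Rails"),
   ("django", "Django"), ("laravel", "Laravel"), ("handlebars", "Handlebars"),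
   ("mustache", "Mustache.js"), ("marionette", "Marionette.js"),
   ("requirejs", "RequireJS"), ("socketio", "Socket.io"), ("express", "Express.js"),
   ("fontawesome", "Font Awesome"), ("modernizr", "Modernizr")]

def priorityList : List String :=
  ["react", "vue", "angular", "angularjs", "nextjs", "nuxt", "svelte",
   "wordpress", "drupal", "joomla", "magento", "shopify", "rails",
   "django", "laravel", "aspnet", "php", "express"]

-- tech["name"] / tech["version"]: exact when the key is present (guaranteed by Pre_)
def nameOf (t : List (String × String)) : String := pyDictGet t "name" ""
def verOf (t : List (String × String)) : String := pyDictGet t "version" ""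

-- ===== PORT A =====
def format_tech_name (vulnerabilities : List (List (String × String))) (detected_techs : Option (List (List (String × String)))) : String :=
  match vulnerabilities with
  | first_vuln :: _ =>
    let tech_type := pyDictGet first_vuln "type" ""
    let version := pyDictGet first_vuln "version" "unknown"
    let tech_name :=
      match techMapList.find? (fun p => PySem.Str.isIn p.1 (PySem.Str.lower tech_type)) with
      | some p => p.2
      | none => "Unknown"
    if version != "unknown" then tech_name ++ " " ++ version else tech_name
  | [] =>
    match detected_techs with
    | some (first :: rest) =>
      match priorityList.findSome?
          (fun p => ((first :: rest).find? (fun t => nameOf t == p)).map (fun t => (p, t))) with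
      | some pt =>
        let tech_name := pyDictGet techMapList pt.1 (pyTitle pt.1)
        if verOf pt.2 != "" then tech_name ++ " " ++ verOf pt.2 else tech_name
      | none =>
        let tech_name := pyDictGet techMapList (nameOf first) (pyTitle (nameOf first))
        if verOf first != "" then tech_name ++ " " ++ verOf first else tech_name
    | _ => "Unknown"

-- ===== PORT B =====
def renderTech (t : List (String × String)) : String :=
  let tech_name := pyDictGet techMapList (nameOf t) (pyTitle (nameOf t))
  if verOf t != "" then tech_name ++ " " ++ verOf t else tech_name

def format_tech_name_alt (vulnerabilities : List (List (String × String))) (detected_techs : Option (List (List (String × String)))) : String :=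
  match vulnerabilities with
  | [] =>
    match detected_techs with
    | none => "Unknown"
    | some [] => "Unknown"
    | some (first :: rest) =>
      let rank : PySem.Dict String Int :=
        (PySem.List.enumerate priorityList).foldl (fun d p => d.insert p.2 p.1) PySem.Dict.empty
      let absent : Int := PySem.List.len priorityList
      let best := (rest.foldl
          (fun (b : List (String × String) × Int) t =>
            let r := rank.getD (nameOf t) absent
            if r < b.2 then (t, r) else b)
          (first, rank.getD (nameOf first) absent)).1
      renderTech best
  | first_vuln :: _ =>
    let lowered := PySem.Str.lower (pyDictGet first_vuln "type" "")
    let tech_name := ((techMapList.find? (fun p => PySem.Str.isIn p.1 lowered)).map (fun p => p.2)).getD "Unknown"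
    let version := pyDictGet first_vuln "version" "unknown"
    if version == "unknown" then tech_name else tech_name ++ " " ++ version

-- ===== PRECONDITION & SPEC =====
-- Pre_ excludes detected-techs lists (reached only when vulnerabilities is empty) containing a dict without
-- the "name" or "version" key: Python subscripts those keys, so A (and B's single pass) raises KeyError
-- there apart from scan-order corners where one program returns before reaching the offending dict.
def Pre_format_tech_name (vulnerabilities : List (List (String × String))) (detected_techs : Option (List (List (String × String)))) : Prop :=
  vulnerabilities = [] →
    ∀ t ∈ detected_techs.getD [],
      ((t.find? (fun p => p.1 == "name")).isSome = true ∧ (t.find? (fun p => p.1 == "version")).isSome = true)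
instance (vulnerabilities : List (List (String × String))) (detected_techs : Option (List (List (String × String)))) : Decidable (Pre_format_tech_name vulnerabilities detected_techs) := by unfold Pre_format_tech_name; infer_instance

def pvWitness_format_tech_name : (List (List (String × String))) × (Option (List (List (String × String)))) :=
  ([], some [[("name", "jquery"), ("version", "3.1")], [("name", "react"), ("version", "")]])

def Spec_format_tech_name (vulnerabilities : List (List (String × String))) (detected_techs : Option (List (List (String × String)))) (out : String) : Prop := out = format_tech_name_alt vulnerabilities detected_techs
instance (vulnerabilities : List (List (String × String))) (detected_techs : Option (List (List (String × String)))) (out : String) : Decidable (Spec_format_tech_name vulnerabilities detected_techs out) := by unfold Spec_format_tech_name; infer_instance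

-- ===== CLAIM (what is proved, stated in full; the proofs are below) =====
def Claim_equal_format_tech_name : Prop := ∀ (vulnerabilities : List (List (String × String))) (detected_techs : Option (List (List (String × String)))), Dom_format_tech_name vulnerabilities detected_techs → Pre_format_tech_name vulnerabilities detected_techs → Spec_format_tech_name vulnerabilities detected_techs (format_tech_name vulnerabilities detected_techs)

-- ===== LEMMAS AND PROOFS =====

-- canonical rank of a tech: index of its name in priorityList (= 18 when absent)
def rk (t : List (String × String)) : Int := (priorityList.idxOf (nameOf t) : Int)

-- first-minimum selection, the shape of B's fold
def fmsel (b : List (String × String)) : List (List (String × String)) → List (String × String)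
  | [] => b
  | t :: ts => if rk t < rk b then fmsel t ts else fmsel b ts

lemma rk_le (t : List (String × String)) : rk t ≤ 18 := by
  have h := List.idxOf_le_length (l := priorityList) (a := nameOf t)
  rw [show priorityList.length = 18 from rfl] at h
  unfold rk
  exact_mod_cast h

-- the rank dictionary computes idxOf
lemma rank_fold_getD (ps : List String) (s : Int) (d : PySem.Dict String Int) (n : String) (dflt : Int)
    (hnd : ps.Nodup) :
    ((PySem.List.enumerate ps s).foldl (fun d p => d.insert p.2 p.1) d).getD n dflt
      = if n ∈ ps then s + (ps.idxOf n : Int) else d.getD n dflt := by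
  induction ps generalizing s d with
  | nil => simp [PySem.List.enumerate]
  | cons p ps' ih =>
    rw [List.nodup_cons] at hnd
    simp only [PySem.List.enumerate, List.foldl_cons]
    rw [ih (s + 1) (d.insert p s) hnd.2]
    by_cases hn : n = p
    · subst hn
      have hnotmem : n ∉ ps' := hnd.1
      simp [hnotmem, List.idxOf_cons, PySem.Dict.getD, PySem.Dict.get?_insert_self]
    · have hne : (p == n) = false := by simp [hn]; tauto
      by_cases hm : n ∈ ps'
      · simp [hm, hn, List.idxOf_cons, hne]
        ring
      · have : n ∉ p :: ps' := by simp [hn, hm]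
        simp only [if_neg hm, if_neg this]
        simp [PySem.Dict.getD, PySem.Dict.get?_insert_of_ne _ _ (by simpa using hn)]

lemma bridge (n : String) :
    ((PySem.List.enumerate priorityList).foldl (fun d p => d.insert p.2 p.1) PySem.Dict.empty).getD n (PySem.List.len priorityList)
      = (priorityList.idxOf n : Int) := by
  have hnd : priorityList.Nodup := by decide
  rw [rank_fold_getD _ _ _ _ _ hnd]
  by_cases hm : n ∈ priorityList
  · simp [hm]
  · have hidx : priorityList.idxOf n = priorityList.length := by
      by_contra hc
      exact hm (List.idxOf_lt_length_iff.mp (lt_of_le_of_ne List.idxOf_le_length hc))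
    simp [hm, hidx, PySem.Dict.getD, PySem.Dict.empty, PySem.Dict.get?, PySem.List.len]

lemma fold_eq_fmsel_core (ts : List (List (String × String))) (b : List (String × String)) :
    ts.foldl
      (fun (acc : List (String × String) × Int) t => if rk t < acc.2 then (t, rk t) else acc)
      (b, rk b)
      = (fmsel b ts, rk (fmsel b ts)) := by
  induction ts generalizing b with
  | nil => simp [fmsel]
  | cons t ts' ih =>
    simp only [List.foldl_cons, fmsel]
    by_cases h : rk t < rk b
    · rw [if_pos h, if_pos h, ih t]
    · rw [if_neg h, if_neg h, ih b]

lemma fold_eq_fmsel (ts : List (List (String × String))) (b : List (String × String)) :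
    ts.foldl
      (fun (acc : List (String × String) × Int) t =>
        let r := ((PySem.List.enumerate priorityList).foldl (fun d p => d.insert p.2 p.1) PySem.Dict.empty).getD (nameOf t) (PySem.List.len priorityList)
        if r < acc.2 then (t, r) else acc)
      (b, ((PySem.List.enumerate priorityList).foldl (fun d p => d.insert p.2 p.1) PySem.Dict.empty).getD (nameOf b) (PySem.List.len priorityList))
      = (fmsel b ts, rk (fmsel b ts)) := by
  simp only [bridge]
  exact fold_eq_fmsel_core ts b

lemma fmsel_min (ts : List (List (String × String))) (b : List (String × String)) :
    rk (fmsel b ts) ≤ rk b ∧ ∀ t ∈ ts, rk (fmsel b ts) ≤ rk t := by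
  induction ts generalizing b with
  | nil => simp [fmsel]
  | cons t ts' ih =>
    simp only [fmsel]
    by_cases h : rk t < rk b
    · rw [if_pos h]
      obtain ⟨h1, h2⟩ := ih t
      exact ⟨le_trans h1 (le_of_lt h), by
        intro u hu
        rcases List.mem_cons.mp hu with rfl | hu'
        · exact h1
        · exact h2 u hu'⟩
    · rw [if_neg h]
      obtain ⟨h1, h2⟩ := ih b
      exact ⟨h1, by
        intro u hu
        rcases List.mem_cons.mp hu with rfl | hu'
        · exact le_trans h1 (not_lt.mp h)
        · exact h2 u hu'⟩

lemma fmsel_eq_of_rk_eq (ts : List (List (String × String))) (b : List (String × String))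
    (h : rk (fmsel b ts) = rk b) : fmsel b ts = b := by
  induction ts generalizing b with
  | nil => simp [fmsel]
  | cons t ts' ih =>
    simp only [fmsel] at h ⊢
    by_cases hlt : rk t < rk b
    · rw [if_pos hlt] at h ⊢
      have := (fmsel_min ts' t).1
      omega
    · rw [if_neg hlt] at h ⊢
      exact ih b h

lemma fmsel_find (ts : List (List (String × String))) (b : List (String × String)) :
    (b :: ts).find? (fun t => rk t == rk (fmsel b ts)) = some (fmsel b ts) := by
  induction ts generalizing b with
  | nil => simp [fmsel]
  | cons t ts' ih =>
    simp only [fmsel]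
    by_cases h : rk t < rk b
    · rw [if_pos h]
      have hm := (fmsel_min ts' t).1
      have hb : (rk b == rk (fmsel t ts')) = false := by
        simp only [beq_eq_false_iff_ne, ne_eq]
        omega
      rw [List.find?_cons, hb]
      exact ih t
    · rw [if_neg h]
      by_cases hb : rk b = rk (fmsel b ts')
      · have heq : fmsel b ts' = b := fmsel_eq_of_rk_eq ts' b hb.symm
        rw [heq]
        simp [List.find?_cons]
      · have hbf : (rk b == rk (fmsel b ts')) = false := by
          simp only [beq_eq_false_iff_ne, ne_eq]
          exact hb
        have hmle := (fmsel_min ts' b).1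
        have htf : (rk t == rk (fmsel b ts')) = false := by
          simp only [beq_eq_false_iff_ne, ne_eq]
          omega
        have ihb := ih b
        rw [List.find?_cons, hbf] at ihb
        rw [List.find?_cons, hbf, List.find?_cons, htf]
        exact ihb

lemma name_eq_iff (t : List (String × String)) (j : Nat) (hj : j < priorityList.length) :
    (nameOf t = priorityList[j]) ↔ rk t = (j : Int) := by
  have hnd : priorityList.Nodup := by decide
  constructor
  · intro h
    unfold rk
    rw [h, List.Nodup.idxOf_getElem hnd j hj]
  · intro h
    unfold rk at h
    have hidx : priorityList.idxOf (nameOf t) = j := by exact_mod_cast h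
    subst hidx
    exact (List.getElem_idxOf hj).symm

lemma rk_lt_of_name_mem (t : List (String × String)) (h : nameOf t ∈ priorityList) : rk t < 18 := by
  have := List.idxOf_lt_length_iff.mpr h
  rw [show priorityList.length = 18 from rfl] at this
  unfold rk
  exact_mod_cast this

lemma findSome?_eq (first : List (String × String)) (rest : List (List (String × String))) :
    priorityList.findSome?
        (fun p => ((first :: rest).find? (fun t => nameOf t == p)).map (fun t => (p, t)))
      = if rk (fmsel first rest) < 18 then some (nameOf (fmsel first rest), fmsel first rest) else none := by
  set c := fmsel first rest with hc
  have hmem : ∀ t ∈ first :: rest, rk c ≤ rk t := by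
    intro t ht
    rcases List.mem_cons.mp ht with rfl | ht'
    · exact (fmsel_min rest t).1
    · exact (fmsel_min rest first).2 t ht'
  have hnd : priorityList.Nodup := by decide
  by_cases h : rk c < 18
  · rw [if_pos h]
    have h0 : (0 : Int) ≤ rk c := by unfold rk; exact Int.natCast_nonneg _
    set j := (rk c).toNat with hjdef
    have hj18 : j < 18 := by omega
    have hj : j < priorityList.length := hj18
    have hjc : (j : Int) = rk c := by omega
    have hsplit : priorityList = priorityList.take j ++ priorityList[j] :: priorityList.drop (j + 1) := by
      rw [← List.drop_eq_getElem_cons hj, List.take_append_drop]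
    rw [hsplit, List.findSome?_append]
    have htake : (priorityList.take j).findSome?
        (fun p => ((first :: rest).find? (fun t => nameOf t == p)).map (fun t => (p, t))) = none := by
      rw [List.findSome?_eq_none_iff]
      intro p hp
      rw [Option.map_eq_none_iff, List.find?_eq_none]
      intro t ht hbeq
      have hname : nameOf t = p := by simpa using hbeq
      obtain ⟨i, hi, hpi⟩ := List.getElem_of_mem hp
      have hij : i < j := by
        have := hi
        simp [List.length_take] at this
        omega
      have hip : priorityList[i] = p := by
        rw [← hpi]
        exact (List.getElem_take).symm
      have hrkt : rk t = (i : Int) := (name_eq_iff t i (by omega)).mp (hip ▸ hname)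
      have := hmem t ht
      omega
    rw [htake, Option.none_or, List.findSome?_cons]
    have hpred : (fun t => nameOf t == priorityList[j]) = (fun t => rk t == rk c) := by
      funext t
      by_cases he : nameOf t = priorityList[j]
      · simp [he, ((name_eq_iff t j hj).mp he).trans hjc]
      · have : ¬ rk t = rk c := fun hr => he ((name_eq_iff t j hj).mpr (by omega))
        simp [he, this]
    rw [hpred, fmsel_find rest first]
    have hnamec : nameOf c = priorityList[j] := (name_eq_iff c j hj).mpr hjc.symm
    simp only [Option.map_some]
    rw [← hc, hnamec]
  · rw [if_neg h]
    rw [List.findSome?_eq_none_iff]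
    intro p hp
    rw [Option.map_eq_none_iff, List.find?_eq_none]
    intro t ht hbeq
    have hname : nameOf t = p := by simpa using hbeq
    have : rk t < 18 := rk_lt_of_name_mem t (hname ▸ hp)
    have := hmem t ht
    omega

-- ===== VERDICT (by name: the statement is the Claim_ definition above) =====
theorem format_tech_name_spec : Claim_equal_format_tech_name := by
  intro vuls dts _ _
  unfold Spec_format_tech_name
  cases vuls with
  | cons fv vrest =>
    simp only [format_tech_name, format_tech_name_alt]
    cases hf : techMapList.find? (fun p => PySem.Str.isIn p.1 (PySem.Str.lower (pyDictGet fv "type" ""))) with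
    | none =>
      simp only [hf, Option.map_none, Option.getD_none, bne]
      cases hv : pyDictGet fv "version" "unknown" == "unknown" <;> simp only [hv, Bool.not_true, Bool.not_false, if_true, if_false] <;> rfl
    | some q =>
      simp only [hf, Option.map_some, Option.getD_some, bne]
      cases hv : pyDictGet fv "version" "unknown" == "unknown" <;> simp only [hv, Bool.not_true, Bool.not_false, if_true, if_false] <;> rfl
  | nil =>
    cases dts with
    | none => rfl
    | some ds =>
      cases ds with
      | nil => rfl
      | cons first rest =>
        show (match priorityList.findSome?
            (fun p => ((first :: rest).find? (fun t => nameOf t == p)).map (fun t => (p, t))) with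
          | some pt =>
            let tech_name := pyDictGet techMapList pt.1 (pyTitle pt.1)
            if verOf pt.2 != "" then tech_name ++ " " ++ verOf pt.2 else tech_name
          | none =>
            let tech_name := pyDictGet techMapList (nameOf first) (pyTitle (nameOf first))
            if verOf first != "" then tech_name ++ " " ++ verOf first else tech_name)
          = renderTech (rest.foldl
              (fun (b : List (String × String) × Int) t =>
                let r := ((PySem.List.enumerate priorityList).foldl (fun d p => d.insert p.2 p.1) PySem.Dict.empty).getD (nameOf t) (PySem.List.len priorityList)
                if r < b.2 then (t, r) else b)
              (first, ((PySem.List.enumerate priorityList).foldl (fun d p => d.insert p.2 p.1) PySem.Dict.empty).getD (nameOf first) (PySem.List.len priorityList))).1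
        rw [fold_eq_fmsel, findSome?_eq]
        by_cases h : rk (fmsel first rest) < 18
        · rw [if_pos h]
          rfl
        · rw [if_neg h]
          have h18 : rk (fmsel first rest) = 18 := by
            have := rk_le (fmsel first rest)
            omega
          have hfb : rk (fmsel first rest) = rk first := by
            have h1 := (fmsel_min rest first).1
            have h2 := rk_le first
            omega
          rw [fmsel_eq_of_rk_eq rest first hfb]
          rfl
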